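-- pv_equiv track=rewrite | github.com/edgallagheris-lucyworksos/lucyworks-os | apps/api/app/forecast_routes.py | room_group
-- ===== SOURCE A (Python) =====
-- def room_group(room_type: str | None, room_name: str | None = None) -> str:
--     value = f"{room_type or ''} {room_name or ''}".lower()
--     if any(x in value for x in ["mri", "ct", "x-ray", "xray", "ultrasound", "imaging"]):
--         return "imaging"
--     if any(x in value for x in ["ward", "kennel", "cat", "dog"]):
--         return "ward"
--     if "icu" in value or "high" in value:
--         return "icu"
--     if "recovery" in value:
--         return "recovery"
--     if "resus" in value or "ecc" in value:
--         return "ecc"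
--     return "theatre"
-- ===== SOURCE B (Python) =====
-- # Position-driven multi-pattern scan: walk the text once and, at each position,
-- # try every keyword, keeping the minimum-priority group seen; A instead runs a
-- # keyword-driven substring-search cascade with early returns.
-- KEYWORD_GROUPS = {
--     "mri": 0, "ct": 0, "x-ray": 0, "xray": 0, "ultrasound": 0, "imaging": 0,
--     "ward": 1, "kennel": 1, "cat": 1, "dog": 1,
--     "icu": 2, "high": 2,
--     "recovery": 3,
--     "resus": 4, "ecc": 4,
-- }
-- GROUP_LABELS = ["imaging", "ward", "icu", "recovery", "ecc"]
--
-- def room_group(room_type, room_name=None):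
--     value = f"{room_type or ''} {room_name or ''}".lower()
--     best = len(GROUP_LABELS)
--     for i in range(len(value)):
--         for kw, g in KEYWORD_GROUPS.items():
--             if g < best and value.startswith(kw, i):
--                 best = g
--     return GROUP_LABELS[best] if best < len(GROUP_LABELS) else "theatre"
-- ===== Notes on version B (the rewrite author's own statement) =====
-- stated objective: alternative
-- what changed: Replaces A's keyword-driven substring-search cascade with a single position-driven scan of the text that tries every keyword at each index and tracks the minimum-priority matched group, mapping it to its label at the end.
import Mathlib
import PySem

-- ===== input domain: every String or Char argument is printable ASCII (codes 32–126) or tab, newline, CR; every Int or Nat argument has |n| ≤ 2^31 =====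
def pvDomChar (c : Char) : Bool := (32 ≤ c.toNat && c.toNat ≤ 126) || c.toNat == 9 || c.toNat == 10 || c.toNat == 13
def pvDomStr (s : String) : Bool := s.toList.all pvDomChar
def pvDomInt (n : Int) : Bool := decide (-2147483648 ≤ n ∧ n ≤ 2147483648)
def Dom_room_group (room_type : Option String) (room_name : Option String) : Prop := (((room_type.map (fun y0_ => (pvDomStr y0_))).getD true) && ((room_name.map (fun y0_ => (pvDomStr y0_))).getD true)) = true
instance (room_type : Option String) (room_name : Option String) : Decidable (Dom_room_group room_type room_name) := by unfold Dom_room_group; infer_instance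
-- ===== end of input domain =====

-- B scans the text once, trying every keyword at each position and tracking the
-- minimum-priority matched group, instead of A's keyword-driven substring cascade
-- (objective: alternative).

-- ===== PORT A =====
def room_group (room_type : Option String) (room_name : Option String) : String :=
  let value := PySem.Str.lower ((room_type.getD "") ++ " " ++ (room_name.getD ""))
  if [("mri" : String), "ct", "x-ray", "xray", "ultrasound", "imaging"].any (fun x => PySem.Str.isIn x value) then "imaging"
  else if [("ward" : String), "kennel", "cat", "dog"].any (fun x => PySem.Str.isIn x value) then "ward"
  else if PySem.Str.isIn "icu" value || PySem.Str.isIn "high" value then "icu"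
  else if PySem.Str.isIn "recovery" value then "recovery"
  else if PySem.Str.isIn "resus" value || PySem.Str.isIn "ecc" value then "ecc"
  else "theatre"

-- ===== PORT B =====
def kwGroups : List (String × Nat) :=
  [("mri", 0), ("ct", 0), ("x-ray", 0), ("xray", 0), ("ultrasound", 0), ("imaging", 0),
   ("ward", 1), ("kennel", 1), ("cat", 1), ("dog", 1),
   ("icu", 2), ("high", 2),
   ("recovery", 3),
   ("resus", 4), ("ecc", 4)]

def groupLabels : List String := ["imaging", "ward", "icu", "recovery", "ecc"]

-- value.startswith(kw, i) with 0 ≤ i ≤ len(value) is exactly a prefix test on the drop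
def room_group_alt (room_type : Option String) (room_name : Option String) : String :=
  let value := PySem.Str.lower ((room_type.getD "") ++ " " ++ (room_name.getD ""))
  let best := (List.range value.toList.length).foldl (fun best i =>
      kwGroups.foldl (fun best p =>
        if p.2 < best && PySem.Chars.startswith (value.toList.drop i) p.1.toList then p.2 else best) best)
    groupLabels.length
  if best < groupLabels.length then groupLabels.getD best "" else "theatre"

-- ===== PRECONDITION & SPEC =====
def Spec_room_group (room_type : Option String) (room_name : Option String) (out : String) : Prop := out = room_group_alt room_type room_name
instance (room_type : Option String) (room_name : Option String) (out : String) : Decidable (Spec_room_group room_type room_name out) := by unfold Spec_room_group; infer_instance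

-- ===== CLAIM (what is proved, stated in full; the proofs are below) =====
def Claim_equal_room_group : Prop := ∀ (room_type : Option String) (room_name : Option String), Dom_room_group room_type room_name → Spec_room_group room_type room_name (room_group room_type room_name)

-- ===== LEMMAS AND PROOFS =====

-- generic facts about min-tracking folds
theorem pv_foldl_le {α : Type} (f : Nat → α → Nat) (h : ∀ b x, f b x ≤ b) :
    ∀ (l : List α) (b : Nat), l.foldl f b ≤ b := by
  intro l
  induction l with
  | nil => intro b; simp
  | cons a t ih => intro b; exact le_trans (ih (f b a)) (h b a)

theorem pv_foldl_achieve {α : Type} (f : Nat → α → Nat) (P : α → Nat → Prop)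
    (h : ∀ b x, f b x = b ∨ P x (f b x)) :
    ∀ (l : List α) (b : Nat), l.foldl f b = b ∨ ∃ x ∈ l, P x (l.foldl f b) := by
  intro l
  induction l with
  | nil => intro b; simp
  | cons a t ih =>
    intro b
    rcases ih (f b a) with h1 | h1
    · rcases h b a with h2 | h2
      · left; simpa [h1] using h2
      · right; exact ⟨a, List.mem_cons_self, by simpa [h1] using h2⟩
    · right
      obtain ⟨x, hx, hpx⟩ := h1
      exact ⟨x, List.mem_cons_of_mem _ hx, by simpa using hpx⟩

theorem pv_foldl_min_le {α : Type} (f : Nat → α → Nat) (h : ∀ b x, f b x ≤ b)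
    (m : Nat) (x : α) (hm : ∀ b, f b x ≤ m) :
    ∀ (l : List α), x ∈ l → ∀ (b : Nat), l.foldl f b ≤ m := by
  intro l
  induction l with
  | nil => intro hx; cases hx
  | cons a t ih =>
    intro hx b
    rcases List.mem_cons.mp hx with rfl | hx'
    · exact le_trans (pv_foldl_le f h t _) (hm b)
    · exact ih hx' (f b a)

-- the inner step of B's fold
def pvStep (L : List Char) (i : Nat) : Nat → (String × Nat) → Nat := fun b p =>
  if p.2 < b && PySem.Chars.startswith (L.drop i) p.1.toList then p.2 else b

theorem pvStep_le (L : List Char) (i : Nat) : ∀ b p, pvStep L i b p ≤ b := by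
  intro b p
  unfold pvStep
  split
  · next hc => simp only [Bool.and_eq_true, decide_eq_true_eq] at hc; omega
  · exact le_refl b

theorem pvStep_achieve (L : List Char) (i : Nat) : ∀ b p, pvStep L i b p = b ∨
    (PySem.Chars.startswith (L.drop i) p.1.toList = true ∧ pvStep L i b p = p.2) := by
  intro b p
  unfold pvStep
  split
  · next hc => simp only [Bool.and_eq_true, decide_eq_true_eq] at hc; exact Or.inr ⟨hc.2, rfl⟩
  · exact Or.inl rfl

theorem pvStep_min (L : List Char) (i : Nat) (p : String × Nat)
    (hp : PySem.Chars.startswith (L.drop i) p.1.toList = true) :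
    ∀ b, pvStep L i b p ≤ p.2 := by
  intro b
  unfold pvStep
  by_cases hlt : p.2 < b
  · simp [hlt, hp]
  · have hc : ¬((decide (p.2 < b) && PySem.Chars.startswith (L.drop i) p.1.toList) = true) := by
      simp [hlt]
    rw [if_neg hc]
    omega

-- the outer step
def pvOuter (L : List Char) : Nat → Nat → Nat := fun b i => kwGroups.foldl (pvStep L i) b

theorem pvOuter_le (L : List Char) : ∀ b i, pvOuter L b i ≤ b := by
  intro b i; exact pv_foldl_le (pvStep L i) (pvStep_le L i) kwGroups b

def pvBest (L : List Char) : Nat := (List.range L.length).foldl (pvOuter L) groupLabels.length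

theorem pvBest_achieve (L : List Char) : pvBest L = 5 ∨
    ∃ i ∈ List.range L.length, ∃ p ∈ kwGroups,
      PySem.Chars.startswith (L.drop i) p.1.toList = true ∧ pvBest L = p.2 := by
  have h := pv_foldl_achieve (pvOuter L)
    (fun i v => ∃ p ∈ kwGroups, PySem.Chars.startswith (L.drop i) p.1.toList = true ∧ v = p.2)
    (by
      intro b i
      have h2 := pv_foldl_achieve (pvStep L i)
        (fun p v => PySem.Chars.startswith (L.drop i) p.1.toList = true ∧ v = p.2)
        (pvStep_achieve L i) kwGroups b
      rcases h2 with h2 | h2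
      · exact Or.inl h2
      · exact Or.inr h2)
    (List.range L.length) groupLabels.length
  simpa [pvBest] using h

theorem pvBest_min (L : List Char) (i : Nat) (hi : i < L.length) (p : String × Nat)
    (hp : p ∈ kwGroups) (hs : PySem.Chars.startswith (L.drop i) p.1.toList = true) :
    pvBest L ≤ p.2 := by
  have hinner : ∀ b, pvOuter L b i ≤ p.2 :=
    pv_foldl_min_le (pvStep L i) (pvStep_le L i) p.2 p (pvStep_min L i p hs) kwGroups hp
  exact pv_foldl_min_le (pvOuter L) (pvOuter_le L) p.2 i hinner (List.range L.length)
    (List.mem_range.mpr hi) _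

-- a prefix somewhere at a position < length is exactly substring membership (for nonempty sub)
theorem pv_exists_startswith_iff (L sub : List Char) (hs : sub ≠ []) :
    (∃ i < L.length, PySem.Chars.startswith (L.drop i) sub = true) ↔
      PySem.Chars.isIn sub L = true := by
  rw [← PySem.Chars.exists_prefix_drop_iff_isIn]
  constructor
  · rintro ⟨i, _, h⟩
    exact ⟨i, (PySem.Chars.startswith_iff _ _).mp h⟩
  · rintro ⟨j, hj⟩
    by_cases hjl : j < L.length
    · exact ⟨j, hjl, (PySem.Chars.startswith_iff _ _).mpr hj⟩
    · exfalso
      have : L.drop j = [] := List.drop_eq_nil_of_le (by omega)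
      rw [this] at hj
      exact hs (List.prefix_nil.mp hj)

-- enumeration facts about the keyword table
theorem pv_kw_cases : ∀ p ∈ kwGroups,
    (p.2 = 0 ∧ p.1 ∈ [("mri" : String), "ct", "x-ray", "xray", "ultrasound", "imaging"]) ∨
    (p.2 = 1 ∧ p.1 ∈ [("ward" : String), "kennel", "cat", "dog"]) ∨
    (p.2 = 2 ∧ (p.1 = "icu" ∨ p.1 = "high")) ∨
    (p.2 = 3 ∧ p.1 = "recovery") ∨
    (p.2 = 4 ∧ (p.1 = "resus" ∨ p.1 = "ecc")) := by decide

theorem pv_kw_nonempty : ∀ p ∈ kwGroups, p.1.toList ≠ [] := by decide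

-- from a matched keyword to Str.isIn on the value, and back
theorem pv_match_isIn (v : String) (p : String × Nat) (hp : p ∈ kwGroups)
    (i : Nat) (hi : i < v.toList.length)
    (hs : PySem.Chars.startswith (v.toList.drop i) p.1.toList = true) :
    PySem.Str.isIn p.1 v = true := by
  have h := (pv_exists_startswith_iff v.toList p.1.toList (pv_kw_nonempty p hp)).mp ⟨i, hi, hs⟩
  rw [PySem.Str.isIn_iff_infix]
  exact (PySem.Chars.isIn_iff_infix _ _).mp h

theorem pv_isIn_le (v : String) (p : String × Nat) (hp : p ∈ kwGroups)
    (hin : PySem.Str.isIn p.1 v = true) : pvBest v.toList ≤ p.2 := by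
  have h : PySem.Chars.isIn p.1.toList v.toList = true := by
    rw [PySem.Chars.isIn_iff_infix]
    exact (PySem.Str.isIn_iff_infix _ _).mp hin
  obtain ⟨i, hi, hs⟩ :=
    (pv_exists_startswith_iff v.toList p.1.toList (pv_kw_nonempty p hp)).mpr h
  exact pvBest_min v.toList i hi p hp hs

-- characterization of pvBest by the cascade's conditions
theorem pvBest_eq (v : String)
    (g : Nat) (hg : g < 5)
    (x : String) (hx : (x, g) ∈ kwGroups) (hin : PySem.Str.isIn x v = true)
    (hnone : ∀ p ∈ kwGroups, p.2 < g → PySem.Str.isIn p.1 v ≠ true) :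
    pvBest v.toList = g := by
  have hle : pvBest v.toList ≤ g := pv_isIn_le v (x, g) hx hin
  rcases pvBest_achieve v.toList with h | h
  · omega
  · obtain ⟨i, hi, p, hp, hs, heq⟩ := h
    have hmem : PySem.Str.isIn p.1 v = true :=
      pv_match_isIn v p hp i (List.mem_range.mp hi) hs
    by_cases hlt : p.2 < g
    · exact absurd hmem (hnone p hp hlt)
    · omega

theorem pvBest_eq_five (v : String)
    (hnone : ∀ p ∈ kwGroups, PySem.Str.isIn p.1 v ≠ true) :
    pvBest v.toList = 5 := by
  rcases pvBest_achieve v.toList with h | h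
  · exact h
  · obtain ⟨i, hi, p, hp, hs, _⟩ := h
    exact absurd (pv_match_isIn v p hp i (List.mem_range.mp hi) hs) (hnone p hp)

-- ===== VERDICT (by name: the statement is the Claim_ definition above) =====
theorem room_group_spec : Claim_equal_room_group := by
  intro rt rn _
  unfold Spec_room_group room_group room_group_alt
  simp only []
  generalize PySem.Str.lower (((rt.getD "") ++ " ") ++ (rn.getD "")) = v
  have hbestdef : (List.range v.toList.length).foldl
      (fun best i => kwGroups.foldl (fun best p =>
        if p.2 < best && PySem.Chars.startswith (v.toList.drop i) p.1.toList then p.2 else best) best)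
      groupLabels.length = pvBest v.toList := rfl
  rw [hbestdef]
  by_cases h0 : ([("mri" : String), "ct", "x-ray", "xray", "ultrasound", "imaging"].any
      (fun x => PySem.Str.isIn x v)) = true
  · obtain ⟨x, hxl, hxin⟩ := List.any_eq_true.mp h0
    have hx : (x, 0) ∈ kwGroups := by fin_cases hxl <;> decide
    have hb : pvBest v.toList = 0 := pvBest_eq v 0 (by omega) x hx hxin (by omega)
    rw [if_pos h0, hb]
    decide
  · have hnone0 : ∀ p ∈ kwGroups, p.2 = 0 → PySem.Str.isIn p.1 v ≠ true := by
      intro p hp hp2 hin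
      rcases pv_kw_cases p hp with ⟨_, hm⟩ | ⟨h1, _⟩ | ⟨h1, _⟩ | ⟨h1, _⟩ | ⟨h1, _⟩
      · exact (List.any_eq_false.mp (Bool.eq_false_iff.mpr h0) p.1 hm) hin
      all_goals omega
    by_cases h1 : ([("ward" : String), "kennel", "cat", "dog"].any
        (fun x => PySem.Str.isIn x v)) = true
    · obtain ⟨x, hxl, hxin⟩ := List.any_eq_true.mp h1
      have hx : (x, 1) ∈ kwGroups := by fin_cases hxl <;> decide
      have hb : pvBest v.toList = 1 := by
        refine pvBest_eq v 1 (by omega) x hx hxin ?_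
        intro p hp hplt
        exact hnone0 p hp (by omega)
      rw [if_neg h0, if_pos h1, hb]
      decide
    · have hnone1 : ∀ p ∈ kwGroups, p.2 ≤ 1 → PySem.Str.isIn p.1 v ≠ true := by
        intro p hp hp2 hin
        rcases pv_kw_cases p hp with ⟨h2, hm⟩ | ⟨h2, hm⟩ | ⟨h2, _⟩ | ⟨h2, _⟩ | ⟨h2, _⟩
        · exact hnone0 p hp h2 hin
        · exact (List.any_eq_false.mp (Bool.eq_false_iff.mpr h1) p.1 hm) hin
        all_goals omega
      by_cases h2 : (PySem.Str.isIn "icu" v || PySem.Str.isIn "high" v) = true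
      · have hb : pvBest v.toList = 2 := by
          rcases (by simpa only [Bool.or_eq_true] using h2 : PySem.Str.isIn "icu" v = true ∨ PySem.Str.isIn "high" v = true) with hc | hc
          · refine pvBest_eq v 2 (by omega) "icu" (by decide) hc ?_
            intro p hp hplt; exact hnone1 p hp (by omega)
          · refine pvBest_eq v 2 (by omega) "high" (by decide) hc ?_
            intro p hp hplt; exact hnone1 p hp (by omega)
        rw [if_neg h0, if_neg h1, if_pos h2, hb]
        decide
      · have h2' : ¬(PySem.Str.isIn "icu" v = true ∨ PySem.Str.isIn "high" v = true) := by
          simpa only [Bool.or_eq_true] using h2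
        have hnone2 : ∀ p ∈ kwGroups, p.2 ≤ 2 → PySem.Str.isIn p.1 v ≠ true := by
          intro p hp hp2 hin
          rcases pv_kw_cases p hp with ⟨h3, _⟩ | ⟨h3, _⟩ | ⟨h3, hm⟩ | ⟨h3, _⟩ | ⟨h3, _⟩
          · exact hnone1 p hp (by omega) hin
          · exact hnone1 p hp (by omega) hin
          · rcases hm with hm | hm
            · exact h2' (Or.inl (hm ▸ hin))
            · exact h2' (Or.inr (hm ▸ hin))
          all_goals omega
        by_cases h3 : PySem.Str.isIn "recovery" v = true
        · have hb : pvBest v.toList = 3 := by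
            refine pvBest_eq v 3 (by omega) "recovery" (by decide) h3 ?_
            intro p hp hplt; exact hnone2 p hp (by omega)
          rw [if_neg h0, if_neg h1, if_neg h2, if_pos h3, hb]
          decide
        · have hnone3 : ∀ p ∈ kwGroups, p.2 ≤ 3 → PySem.Str.isIn p.1 v ≠ true := by
            intro p hp hp2 hin
            rcases pv_kw_cases p hp with ⟨h4, _⟩ | ⟨h4, _⟩ | ⟨h4, _⟩ | ⟨h4, hm⟩ | ⟨h4, _⟩
            · exact hnone2 p hp (by omega) hin
            · exact hnone2 p hp (by omega) hin
            · exact hnone2 p hp (by omega) hin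
            · exact h3 (hm ▸ hin)
            · omega
          by_cases h4 : (PySem.Str.isIn "resus" v || PySem.Str.isIn "ecc" v) = true
          · have hb : pvBest v.toList = 4 := by
              rcases (by simpa only [Bool.or_eq_true] using h4 : PySem.Str.isIn "resus" v = true ∨ PySem.Str.isIn "ecc" v = true) with hc | hc
              · refine pvBest_eq v 4 (by omega) "resus" (by decide) hc ?_
                intro p hp hplt; exact hnone3 p hp (by omega)
              · refine pvBest_eq v 4 (by omega) "ecc" (by decide) hc ?_
                intro p hp hplt; exact hnone3 p hp (by omega)
            rw [if_neg h0, if_neg h1, if_neg h2, if_neg h3, if_pos h4, hb]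
            decide
          · have h4' : ¬(PySem.Str.isIn "resus" v = true ∨ PySem.Str.isIn "ecc" v = true) := by
              simpa only [Bool.or_eq_true] using h4
            have hb : pvBest v.toList = 5 := by
              refine pvBest_eq_five v ?_
              intro p hp hin
              rcases pv_kw_cases p hp with ⟨h5, _⟩ | ⟨h5, _⟩ | ⟨h5, _⟩ | ⟨h5, _⟩ | ⟨h5, hm⟩
              · exact hnone3 p hp (by omega) hin
              · exact hnone3 p hp (by omega) hin
              · exact hnone3 p hp (by omega) hin
              · exact hnone3 p hp (by omega) hin
              · rcases hm with hm | hm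
                · exact h4' (Or.inl (hm ▸ hin))
                · exact h4' (Or.inr (hm ▸ hin))
            rw [if_neg h0, if_neg h1, if_neg h2, if_neg h3, if_neg h4, hb]
            decide
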